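-- pv_equiv track=rewrite | github.com/kartikvrama/parsec | utils/utils_data.py | return_unmatched_elements
-- ===== SOURCE A (Python) =====
-- from typing import Dict, Optional, Tuple, List, Any, Union
--
-- def return_unmatched_elements(list_query: List[Any], list_ref: List[Any]) -> List[Any]:
--     """Returns items in the query list that do not match with reference list items.
--
--     Args:
--         list_query: List of items to be matched.
--         list_ref: List of items to be matched against.
--
--     Returns:
--         List of unmatched elements in the query list.
--     """
--
--     unmatched_elems_query = list_query.copy()
--     unmatched_elems_value = list_ref.copy()
--
--     for obj in list_query:
--         if obj in unmatched_elems_value: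
--             # Remove obj from original lists
--             unmatched_elems_query.remove(obj)
--             unmatched_elems_value.remove(obj)
--
--     return unmatched_elems_query
-- ===== SOURCE B (Python) =====
-- def return_unmatched_elements(list_query, list_ref):
--     """Returns items in the query list that do not match with reference list items.
--
--     Single pass with a count map of the reference instead of repeated
--     membership tests / removals on lists.
--     """
--     remaining = {}
--     for item in list_ref:
--         remaining[item] = remaining.get(item, 0) + 1
--     unmatched = []
--     for obj in list_query:
--         if remaining.get(obj, 0) > 0:
--             remaining[obj] = remaining[obj] - 1
--         else:
--             unmatched.append(obj)
--     return unmatched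
-- ===== Notes on version B (the rewrite author's own statement) =====
-- stated objective: faster
-- what changed: Replaces the quadratic scan-and-remove over two list copies by building a count map of the reference once and doing a single pass over the query that decrements counts, appending unmatched items.
import Mathlib
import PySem

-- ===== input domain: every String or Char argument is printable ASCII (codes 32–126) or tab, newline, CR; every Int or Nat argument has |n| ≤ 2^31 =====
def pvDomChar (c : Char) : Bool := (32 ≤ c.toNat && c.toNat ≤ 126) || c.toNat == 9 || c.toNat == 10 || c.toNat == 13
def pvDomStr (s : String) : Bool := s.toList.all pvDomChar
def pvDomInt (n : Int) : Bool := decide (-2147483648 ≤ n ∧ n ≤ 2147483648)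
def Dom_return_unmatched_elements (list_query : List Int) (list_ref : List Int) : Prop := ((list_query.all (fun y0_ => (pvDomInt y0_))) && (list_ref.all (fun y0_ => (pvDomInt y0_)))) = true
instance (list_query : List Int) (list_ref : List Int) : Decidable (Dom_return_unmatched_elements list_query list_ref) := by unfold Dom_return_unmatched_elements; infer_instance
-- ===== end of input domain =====

-- B replaces A's quadratic scan-and-remove over two list copies by a reference
-- count map built once plus a single pass over the query (objective: faster).

-- ===== PORT A =====
-- state = (unmatched_elems_query, unmatched_elems_value); the 'remove' calls are
-- guarded by membership, so '.getD s' never fires its default.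
def return_unmatched_elements (list_query : List Int) (list_ref : List Int) : List Int :=
  (list_query.foldl
    (fun (s : List Int × List Int) obj =>
      if obj ∈ s.2 then
        ((PySem.List.remove? s.1 obj).getD s.1, (PySem.List.remove? s.2 obj).getD s.2)
      else s)
    (list_query, list_ref)).1

-- ===== PORT B =====
-- remaining = count map of list_ref; one pass over list_query appending unmatched items.
def return_unmatched_elements_alt (list_query : List Int) (list_ref : List Int) : List Int :=
  let remaining := list_ref.foldl (fun d x => d.insert x (d.getD x 0 + 1)) PySem.Dict.empty
  (list_query.foldl
    (fun (s : PySem.Dict Int Int × List Int) obj =>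
      if s.1.getD obj 0 > 0 then (s.1.insert obj (s.1.getD obj 0 - 1), s.2)
      else (s.1, s.2 ++ [obj]))
    (remaining, [])).2

-- ===== PRECONDITION & SPEC =====
def Spec_return_unmatched_elements (list_query : List Int) (list_ref : List Int) (out : List Int) : Prop := out = return_unmatched_elements_alt list_query list_ref
instance (list_query : List Int) (list_ref : List Int) (out : List Int) : Decidable (Spec_return_unmatched_elements list_query list_ref out) := by unfold Spec_return_unmatched_elements; infer_instance

-- ===== CLAIM (what is proved, stated in full; the proofs are below) =====
def Claim_equal_return_unmatched_elements : Prop := ∀ (list_query : List Int) (list_ref : List Int), Dom_return_unmatched_elements list_query list_ref → Spec_return_unmatched_elements list_query list_ref (return_unmatched_elements list_query list_ref)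

-- ===== LEMMAS AND PROOFS =====

-- Core invariant: while processing the remaining suffix `rest`, A's query list is
-- `kept ++ rest` where each kept element is no longer in A's remaining reference `uv`,
-- and B's count map `cnt` holds exactly the multiplicities of `uv`.
theorem pv_loop_eq (rest : List Int) : ∀ (kept uv : List Int) (cnt : PySem.Dict Int Int),
    (∀ x ∈ kept, x ∉ uv) →
    (∀ v : Int, (uv.count v : Int) = cnt.getD v 0) →
    (rest.foldl
      (fun (s : List Int × List Int) obj =>
        if obj ∈ s.2 then
          ((PySem.List.remove? s.1 obj).getD s.1, (PySem.List.remove? s.2 obj).getD s.2)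
        else s)
      (kept ++ rest, uv)).1
    = (rest.foldl
        (fun (s : PySem.Dict Int Int × List Int) obj =>
          if s.1.getD obj 0 > 0 then (s.1.insert obj (s.1.getD obj 0 - 1), s.2)
          else (s.1, s.2 ++ [obj]))
        (cnt, kept)).2 := by
  induction rest with
  | nil => intro kept uv cnt _ _; simp
  | cons obj rest ih =>
    intro kept uv cnt hkept hcnt
    by_cases hmem : obj ∈ uv
    · -- matched: A removes obj from both lists, B decrements the count
      have hpos : 0 < cnt.getD obj 0 := by
        have := hcnt obj
        have h1 : 0 < uv.count obj := List.count_pos_iff.mpr hmem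
        omega
      have hnk : obj ∉ kept := fun h => hkept obj h hmem
      have hrmq : PySem.List.remove? (kept ++ obj :: rest) obj = some (kept ++ rest) := by
        have hm : obj ∈ kept ++ obj :: rest := by simp
        rw [PySem.List.remove?_eq_some_erase _ _ hm, List.erase_append_right _ hnk,
          List.erase_cons_head]
      have hrmv : PySem.List.remove? uv obj = some (uv.erase obj) :=
        PySem.List.remove?_eq_some_erase _ _ hmem
      simp only [List.foldl_cons, if_pos, hmem, hpos, hrmq, hrmv, Option.getD_some]
      exact ih kept (uv.erase obj) (cnt.insert obj (cnt.getD obj 0 - 1))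
        (fun x hx hx' => hkept x hx (List.mem_of_mem_erase hx'))
        (fun v => by
          rw [PySem.Dict.getD_insert]
          by_cases hv : v = obj
          · subst hv
            have h1 : 0 < uv.count v := List.count_pos_iff.mpr hmem
            have := hcnt v
            rw [if_pos rfl, List.count_erase_self]
            omega
          · rw [if_neg hv, List.count_erase_of_ne (by exact fun h => hv h)]
            exact hcnt v)
    · -- unmatched: A keeps obj in place, B appends it
      have hz : cnt.getD obj 0 = 0 := by
        have := hcnt obj
        have h1 : uv.count obj = 0 := List.count_eq_zero.mpr hmem
        omega
      simp only [List.foldl_cons, if_neg hmem, hz]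
      rw [show (kept ++ obj :: rest : List Int) = (kept ++ [obj]) ++ rest by simp]
      rw [if_neg (by omega : ¬ (0:Int) < 0)]
      exact ih (kept ++ [obj]) uv cnt
        (fun x hx => by
          rcases List.mem_append.mp hx with h | h
          · exact hkept x h
          · simp at h; subst h; exact hmem)
        hcnt

-- ===== VERDICT (by name: the statement is the Claim_ definition above) =====
theorem return_unmatched_elements_spec : Claim_equal_return_unmatched_elements := by
  intro q r _
  show return_unmatched_elements q r = return_unmatched_elements_alt q r
  unfold return_unmatched_elements return_unmatched_elements_alt
  have := pv_loop_eq q [] r (r.foldl (fun d x => d.insert x (d.getD x 0 + 1)) PySem.Dict.empty)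
    (by simp)
    (fun v => by
      rw [PySem.Dict.getD_foldl_insert_add_one]
      simp)
  simpa using this
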